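-- pv_equiv track=rewrite | github.com/isndotbiz/ged | tools/cli/gedfix/fix_non_date.py | _fix_fam_record
-- ===== SOURCE A (Python) =====
-- def _fix_fam_record(rec: list[str], approve_dup_facts: bool, note_prefix: str) -> list[str]:
--     out=[]
--     out.append(" ".join(rec[0].strip().split()))
--     i=1
--     blocks=[]
--     while i < len(rec):
--         line = " ".join(rec[i].strip().split())
--         parts = line.split(" ", 2)
--         if len(parts)>=2 and parts[0]=="1" and parts[1]=="MARR":
--             k=i+1
--             block=[line]
--             while k < len(rec):
--                 nxt = rec[k]
--                 if nxt.strip() and int(nxt.split(" ",1)[0]) <= 1: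
--                     break
--                 block.append(" ".join(nxt.strip().split()))
--                 k += 1
--             blocks.append(block)
--             i=k
--             continue
--         else:
--             out.append(line)
--             i+=1
--     # dedupe identical MARR blocks
--     seen=set()
--     kept=0
--     for b in blocks:
--         sig="\n".join(b)
--         if sig in seen and approve_dup_facts:
--             out.append(f"1 NOTE {note_prefix} Removed duplicate MARR block")
--             continue
--         seen.add(sig)
--         out.extend(b); kept+=1
--     return out
-- ===== SOURCE B (Python) =====
-- def _fix_fam_record(rec: list[str], approve_dup_facts: bool, note_prefix: str) -> list[str]:
--     # Single pass: a state machine with a current-MARR-block accumulator,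
--     # deduping each block as it is flushed into a separate tail buffer.
--     out = [" ".join(rec[0].strip().split())]
--     tail = []            # relocated (deduped) MARR blocks / NOTE lines
--     seen = set()
--     cur = None           # current MARR block being accumulated, or None
--
--     def flush():
--         nonlocal cur
--         if cur is None:
--             return
--         sig = "\n".join(cur)
--         if sig in seen and approve_dup_facts:
--             tail.append(f"1 NOTE {note_prefix} Removed duplicate MARR block")
--         else:
--             seen.add(sig)
--             tail.extend(cur)
--         cur = None
--
--     for raw in rec[1:]:
--         if cur is not None:
--             if not raw.strip() or int(raw.split(" ", 1)[0]) > 1: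
--                 cur.append(" ".join(raw.strip().split()))
--                 continue
--             flush()
--         line = " ".join(raw.strip().split())
--         p = line.split(" ", 2)
--         if len(p) >= 2 and p[0] == "1" and p[1] == "MARR":
--             cur = [line]
--         else:
--             out.append(line)
--     flush()
--     return out + tail
-- ===== Notes on version B (the rewrite author's own statement) =====
-- stated objective: alternative
-- what changed: Replaces A's two-phase scheme (outer index loop with a nested peek-ahead scan collecting MARR blocks, then a second dedup loop over the collected blocks) by a single linear pass: a state machine over rec[1:] with a current-block accumulator, flushing each block through an incrementally-maintained seen-signature set into a separate tail buffer.
import Mathlib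
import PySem

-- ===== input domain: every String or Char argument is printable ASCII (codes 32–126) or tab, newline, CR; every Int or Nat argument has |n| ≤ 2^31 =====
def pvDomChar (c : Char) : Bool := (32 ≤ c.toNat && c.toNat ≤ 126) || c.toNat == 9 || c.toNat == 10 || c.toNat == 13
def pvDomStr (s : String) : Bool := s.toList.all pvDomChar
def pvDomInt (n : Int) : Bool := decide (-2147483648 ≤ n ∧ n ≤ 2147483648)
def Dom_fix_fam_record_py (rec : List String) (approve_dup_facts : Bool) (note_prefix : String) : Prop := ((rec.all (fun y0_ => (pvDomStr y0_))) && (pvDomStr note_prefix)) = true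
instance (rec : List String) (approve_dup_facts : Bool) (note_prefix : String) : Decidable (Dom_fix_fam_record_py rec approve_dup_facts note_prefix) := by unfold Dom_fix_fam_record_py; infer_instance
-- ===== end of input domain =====

-- B fuses A's two phases (nested peek-ahead parse collecting MARR blocks, then a separate dedup
-- pass) into one linear state machine with a current-block accumulator and incremental dedup.

-- shared Python snippets appearing verbatim in both sources:
-- " ".join(s.strip().split())
def pvNorm (s : String) : String := PySem.Str.join " " (PySem.Str.split₀ (PySem.Str.strip s))
-- s.split(" ", 1)[0]
def pvTok (s : String) : String := ((PySem.Str.splitMax? s " " 1).getD []).headD ""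
-- parts = line.split(" ", 2); len(parts) >= 2 and parts[0] == "1" and parts[1] == "MARR"
def pvIsMarr (line : String) : Bool :=
  let p := (PySem.Str.splitMax? line " " 2).getD []
  decide (2 ≤ p.length) && (p.getD 0 "" == "1") && (p.getD 1 "" == "MARR")

-- ===== PORT A =====
-- A's index loops only move forward, so each is ported as recursion on the remaining suffix.
-- nxt.strip() and int(nxt.split(" ",1)[0]) <= 1  (int() made total by getD 0: raising inputs are outside Pre_)
def pvABreak (s : String) : Bool :=
  !(PySem.Str.strip s == "") && decide ((PySem.Int.ofStr? (pvTok s)).getD 0 ≤ 1)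

-- inner while: collect a MARR block, returning (block, remaining lines)
def pvAScan (l : List String) (block : List String) : List String × List String :=
  match l with
  | [] => (block, [])
  | nxt :: rest =>
    if pvABreak nxt then (block, nxt :: rest)
    else pvAScan rest (block ++ [pvNorm nxt])

theorem pvAScan_length (l block : List String) : (pvAScan l block).2.length ≤ l.length := by
  induction l generalizing block with
  | nil => simp [pvAScan]
  | cons x rest ih =>
    simp only [pvAScan]
    split
    · simp
    · exact le_trans (ih _) (Nat.le_succ _)

-- outer while over rec[1:], collecting normalized lines into out and MARR blocks into blocks
def pvALoop (l : List String) (out : List String) (blocks : List (List String)) :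
    List String × List (List String) :=
  match l with
  | [] => (out, blocks)
  | x :: rest =>
    if pvIsMarr (pvNorm x) then
      pvALoop (pvAScan rest [pvNorm x]).2 out (blocks ++ [(pvAScan rest [pvNorm x]).1])
    else
      pvALoop rest (out ++ [pvNorm x]) blocks
termination_by l.length
decreasing_by
  · exact Nat.lt_succ_of_le (pvAScan_length rest [pvNorm x])
  · simp

-- body of A's dedup loop: 'for b in blocks: …' over the state (seen, out)
def pvADedupStep (approve_dup_facts : Bool) (note_prefix : String)
    (st : PySem.Set String × List String) (b : List String) : PySem.Set String × List String :=
  let sig := PySem.Str.join "\n" b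
  if PySem.Set.contains st.1 sig && approve_dup_facts then
    (st.1, st.2 ++ ["1 NOTE " ++ note_prefix ++ " Removed duplicate MARR block"])
  else
    (PySem.Set.add st.1 sig, st.2 ++ b)

def fix_fam_record_py (rec : List String) (approve_dup_facts : Bool) (note_prefix : String) : List String :=
  let out0 := [pvNorm ((PySem.List.pyGet? rec 0).getD "")]
  let r := pvALoop (rec.drop 1) out0 []
  (r.2.foldl (pvADedupStep approve_dup_facts note_prefix) (PySem.Set.empty, r.1)).2

-- ===== PORT B =====
def pvBFlush (approve_dup_facts : Bool) (note_prefix : String)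
    (tail : List String) (seen : PySem.Set String) (cur : Option (List String)) :
    List String × PySem.Set String :=
  match cur with
  | none => (tail, seen)
  | some b =>
    let sig := PySem.Str.join "\n" b
    if PySem.Set.contains seen sig && approve_dup_facts then
      (tail ++ ["1 NOTE " ++ note_prefix ++ " Removed duplicate MARR block"], seen)
    else
      (tail ++ b, PySem.Set.add seen sig)

-- the tail of B's loop body: normalize, then start a block or emit the line
def pvBLine (out tail : List String) (seen : PySem.Set String) (raw : String) :
    List String × List String × PySem.Set String × Option (List String) :=
  if pvIsMarr (pvNorm raw) then (out, tail, seen, some [pvNorm raw])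
  else (out ++ [pvNorm raw], tail, seen, none)

def pvBStep (approve_dup_facts : Bool) (note_prefix : String)
    (st : List String × List String × PySem.Set String × Option (List String)) (raw : String) :
    List String × List String × PySem.Set String × Option (List String) :=
  match st with
  | (out, tail, seen, some b) =>
    -- not raw.strip() or int(raw.split(" ", 1)[0]) > 1 → keep accumulating
    if (PySem.Str.strip raw == "") || decide (1 < (PySem.Int.ofStr? (pvTok raw)).getD 0) then
      (out, tail, seen, some (b ++ [pvNorm raw]))
    else
      pvBLine out (pvBFlush approve_dup_facts note_prefix tail seen (some b)).1
        (pvBFlush approve_dup_facts note_prefix tail seen (some b)).2 raw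
  | (out, tail, seen, none) => pvBLine out tail seen raw

def fix_fam_record_py_alt (rec : List String) (approve_dup_facts : Bool) (note_prefix : String) : List String :=
  let out0 := [pvNorm ((PySem.List.pyGet? rec 0).getD "")]
  let st := (rec.drop 1).foldl (pvBStep approve_dup_facts note_prefix) (out0, [], PySem.Set.empty, none)
  st.1 ++ (pvBFlush approve_dup_facts note_prefix st.2.1 st.2.2.1 st.2.2.2).1

-- ===== PRECONDITION & SPEC =====
-- a line on which the inner scan's int() raises ValueError
def pvBad (s : String) : Bool := !(PySem.Str.strip s == "") && (PySem.Int.ofStr? (pvTok s)).isNone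
-- a line the inner scan consumes without breaking
def pvCons (s : String) : Bool :=
  (PySem.Str.strip s == "") || ((PySem.Int.ofStr? (pvTok s)).map (fun t => decide (1 < t))).getD false

-- Pre_ excludes exactly the inputs on which the Python raises: the empty record (IndexError on
-- rec[0]) and records where a MARR block scan meets a non-empty line whose first raw token
-- int() rejects (ValueError).
def Pre_fix_fam_record_py (rec : List String) (approve_dup_facts : Bool) (note_prefix : String) : Prop :=
  rec ≠ [] ∧ ∀ i ∈ List.range rec.length, ∀ j ∈ List.range i, 1 ≤ j →
    pvIsMarr (pvNorm (rec.getD j "")) = true → pvBad (rec.getD i "") = true →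
    ∃ m ∈ List.range i, j < m ∧ pvCons (rec.getD m "") = false

instance (rec : List String) (approve_dup_facts : Bool) (note_prefix : String) :
    Decidable (Pre_fix_fam_record_py rec approve_dup_facts note_prefix) := by
  unfold Pre_fix_fam_record_py; infer_instance

def pvWitness_fix_fam_record_py : List String × Bool × String :=
  (["0 @F1@ FAM", "1 MARR", "2 DATE 1 JAN 1900"], true, "GEDFIX")

def Spec_fix_fam_record_py (rec : List String) (approve_dup_facts : Bool) (note_prefix : String) (out : List String) : Prop := out = fix_fam_record_py_alt rec approve_dup_facts note_prefix
instance (rec : List String) (approve_dup_facts : Bool) (note_prefix : String) (out : List String) : Decidable (Spec_fix_fam_record_py rec approve_dup_facts note_prefix out) := by unfold Spec_fix_fam_record_py; infer_instance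

-- ===== CLAIM (what is proved, stated in full; the proofs are below) =====
def Claim_equal_fix_fam_record_py : Prop := ∀ (rec : List String) (approve_dup_facts : Bool) (note_prefix : String), Dom_fix_fam_record_py rec approve_dup_facts note_prefix → Pre_fix_fam_record_py rec approve_dup_facts note_prefix → Spec_fix_fam_record_py rec approve_dup_facts note_prefix (fix_fam_record_py rec approve_dup_facts note_prefix)

-- ===== LEMMAS AND PROOFS =====
-- (A = B in fact holds for ALL inputs of the ports, so the proofs never need Dom/Pre.)

-- finalization of B's loop state
def pvBFin (a : Bool) (np : String)
    (st : List String × List String × PySem.Set String × Option (List String)) : List String :=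
  st.1 ++ (pvBFlush a np st.2.1 st.2.2.1 st.2.2.2).1

theorem pvALoop_nil (out : List String) (bs : List (List String)) : pvALoop [] out bs = (out, bs) := by
  rw [pvALoop.eq_def]

theorem pvALoop_cons_marr (x : String) (rest out : List String) (bs : List (List String))
    (hm : pvIsMarr (pvNorm x) = true) :
    pvALoop (x :: rest) out bs =
      pvALoop (pvAScan rest [pvNorm x]).2 out (bs ++ [(pvAScan rest [pvNorm x]).1]) := by
  rw [pvALoop.eq_def]
  simp only [hm, if_true]

theorem pvALoop_cons_not (x : String) (rest out : List String) (bs : List (List String))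
    (hm : pvIsMarr (pvNorm x) = false) :
    pvALoop (x :: rest) out bs = pvALoop rest (out ++ [pvNorm x]) bs := by
  rw [pvALoop.eq_def]
  simp only [hm, Bool.false_eq_true, if_false]

-- the blocks accumulator of A's outer loop only collects appended blocks
theorem pvALoop_blocks (n : Nat) : ∀ (l : List String), l.length ≤ n → ∀ (out : List String)
    (bs : List (List String)),
    pvALoop l out bs = ((pvALoop l out []).1, bs ++ (pvALoop l out []).2) := by
  induction n with
  | zero =>
    intro l hl out bs
    have : l = [] := List.eq_nil_of_length_eq_zero (Nat.le_zero.mp hl)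
    subst this; simp [pvALoop_nil]
  | succ n ih =>
    intro l hl out bs
    match l with
    | [] => simp [pvALoop_nil]
    | x :: rest =>
      cases hm : pvIsMarr (pvNorm x) with
      | true =>
        rw [pvALoop_cons_marr _ _ _ _ hm, pvALoop_cons_marr _ _ _ _ hm]
        have hlen : (pvAScan rest [pvNorm x]).2.length ≤ n := by
          have := pvAScan_length rest [pvNorm x]
          simp at hl; omega
        rw [ih _ hlen out (bs ++ [(pvAScan rest [pvNorm x]).1]),
            ih _ hlen out ([] ++ [(pvAScan rest [pvNorm x]).1])]
        simp
      | false =>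
        rw [pvALoop_cons_not _ _ _ _ hm, pvALoop_cons_not _ _ _ _ hm]
        have hlen : rest.length ≤ n := by simp at hl; omega
        exact ih _ hlen (out ++ [pvNorm x]) bs

-- B's flush of a block is A's dedup step with the pair components swapped
theorem pvFlush_swap (a : Bool) (np : String) (tail : List String) (seen : PySem.Set String)
    (b : List String) :
    pvBFlush a np tail seen (some b) =
      ((pvADedupStep a np (seen, tail) b).2, (pvADedupStep a np (seen, tail) b).1) := by
  simp only [pvBFlush, pvADedupStep]
  split <;> rfl

-- B's keep-accumulating test is the complement of A's break test
theorem pvConsume_eq (s : String) :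
    ((PySem.Str.strip s == "") || decide (1 < (PySem.Int.ofStr? (pvTok s)).getD 0)) = !pvABreak s := by
  simp only [pvABreak]
  cases h : (PySem.Str.strip s == "") with
  | false =>
    simp only [Bool.false_or, Bool.not_false, Bool.true_and]
    rw [← decide_not]
    exact decide_eq_decide.mpr (by omega)
  | true => rfl

-- block mode: B's fold while accumulating equals flushing A's scanned block and restarting
theorem pvL1 (a : Bool) (np : String) (l : List String) :
    ∀ (b out tail : List String) (seen : PySem.Set String),
      pvBFin a np (l.foldl (pvBStep a np) (out, tail, seen, some b)) =
      pvBFin a np ((pvAScan l b).2.foldl (pvBStep a np)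
        (out, (pvBFlush a np tail seen (some (pvAScan l b).1)).1,
              (pvBFlush a np tail seen (some (pvAScan l b).1)).2, none)) := by
  induction l with
  | nil => intro b out tail seen; rfl
  | cons x rest ih =>
    intro b out tail seen
    cases hbr : pvABreak x with
    | true =>
      have hc : ((PySem.Str.strip x == "") || decide (1 < (PySem.Int.ofStr? (pvTok x)).getD 0)) = false := by
        rw [pvConsume_eq, hbr]; rfl
      simp only [pvAScan, hbr, if_true, List.foldl_cons]
      simp only [pvBStep, hc, Bool.false_eq_true, if_false]
    | false =>
      have hc : ((PySem.Str.strip x == "") || decide (1 < (PySem.Int.ofStr? (pvTok x)).getD 0)) = true := by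
        rw [pvConsume_eq, hbr]; rfl
      simp only [pvAScan, hbr, Bool.false_eq_true, if_false, List.foldl_cons]
      simp only [pvBStep, hc, if_true]
      exact ih (b ++ [pvNorm x]) out tail seen

-- A's dedup fold over an output accumulator appends
theorem pvDedup_shift (a : Bool) (np : String) (bs : List (List String)) :
    ∀ (seen : PySem.Set String) (acc : List String),
      bs.foldl (pvADedupStep a np) (seen, acc) =
        ((bs.foldl (pvADedupStep a np) (seen, [])).1,
          acc ++ (bs.foldl (pvADedupStep a np) (seen, [])).2) := by
  induction bs with
  | nil => intro seen acc; simp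
  | cons b bs ih =>
    intro seen acc
    have hstep : ∀ (ac : List String), pvADedupStep a np (seen, ac) b =
        ((pvADedupStep a np (seen, []) b).1, ac ++ (pvADedupStep a np (seen, []) b).2) := by
      intro ac; dsimp only [pvADedupStep]; split <;> rfl
    simp only [List.foldl_cons]
    rw [hstep acc]
    rw [ih ((pvADedupStep a np (seen, []) b).1) (acc ++ (pvADedupStep a np (seen, []) b).2)]
    conv_rhs => rw [← Prod.mk.eta (p := pvADedupStep a np (seen, []) b)]
    rw [ih ((pvADedupStep a np (seen, []) b).1) ((pvADedupStep a np (seen, []) b).2)]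
    simp [List.append_assoc]

-- main invariant: B's single pass equals A's parse phase followed by A's dedup fold
theorem pvT (a : Bool) (np : String) (n : Nat) : ∀ (l : List String), l.length ≤ n →
    ∀ (out tail : List String) (seen : PySem.Set String),
      pvBFin a np (l.foldl (pvBStep a np) (out, tail, seen, none)) =
        (pvALoop l out []).1 ++
          ((pvALoop l out []).2.foldl (pvADedupStep a np) (seen, tail)).2 := by
  induction n with
  | zero =>
    intro l hl out tail seen
    have : l = [] := List.eq_nil_of_length_eq_zero (Nat.le_zero.mp hl)
    subst this; rw [pvALoop_nil]; rfl
  | succ n ih =>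
    intro l hl out tail seen
    match l with
    | [] => rw [pvALoop_nil]; rfl
    | x :: rest =>
      cases hm : pvIsMarr (pvNorm x) with
      | true =>
        simp only [List.foldl_cons, pvBStep, pvBLine, hm, if_true]
        rw [pvL1 a np rest [pvNorm x] out tail seen]
        have hlen : (pvAScan rest [pvNorm x]).2.length ≤ n := by
          have := pvAScan_length rest [pvNorm x]
          simp at hl; omega
        rw [ih _ hlen]
        rw [pvALoop_cons_marr _ _ _ _ hm]
        rw [pvALoop_blocks ((pvAScan rest [pvNorm x]).2.length) _ le_rfl out
            ([] ++ [(pvAScan rest [pvNorm x]).1])]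
        simp only [List.nil_append, List.cons_append, List.foldl_cons, List.nil_append]
        rw [pvFlush_swap]
      | false =>
        simp only [List.foldl_cons, pvBStep, pvBLine, hm, Bool.false_eq_true, if_false]
        have hlen : rest.length ≤ n := by simp at hl; omega
        rw [ih _ hlen]
        rw [pvALoop_cons_not _ _ _ _ hm]

-- ===== VERDICT (by name: the statement is the Claim_ definition above) =====
theorem fix_fam_record_py_spec : Claim_equal_fix_fam_record_py := by
  intro rec a np _ _
  unfold Spec_fix_fam_record_py
  have hB : fix_fam_record_py_alt rec a np = pvBFin a np ((rec.drop 1).foldl (pvBStep a np)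
      ([pvNorm ((PySem.List.pyGet? rec 0).getD "")], [], PySem.Set.empty, none)) := rfl
  rw [hB, pvT a np (rec.drop 1).length (rec.drop 1) le_rfl]
  simp only [fix_fam_record_py]
  rw [pvDedup_shift a np _ PySem.Set.empty
      (pvALoop (rec.drop 1) [pvNorm ((PySem.List.pyGet? rec 0).getD "")] []).1]
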